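-- pv_equiv track=rewrite | github.com/1LStopBudapest/Helper | Binning.py | findCR2BinIndex
-- ===== SOURCE A (Python) =====
-- CT_bin = [300, 400, -1]
--
-- MT_bin = [0, 60, 95, 130, -1]
--
-- def findCR2BinIndex(CT, MT):
--     idx = -1
--     pickIdx = -1
--     for j in range(len(MT_bin)-1):
--         cut1 = MT>MT_bin[j] if j == len(MT_bin)-2 else MT>MT_bin[j] and MT<=MT_bin[j+1]
--         for i in range(len(CT_bin)-1):
--             cut2 = CT>CT_bin[i] if i == len(CT_bin)-2 else CT>CT_bin[i] and CT<=CT_bin[i+1]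
--             idx += 1
--             if (cut1 and cut2):
--                 pickIdx = idx
--                 break
--         else:
--             continue
--         break
--
--     return pickIdx
-- ===== SOURCE B (Python) =====
-- CT_bin = [300, 400, -1]
--
-- MT_bin = [0, 60, 95, 130, -1]
--
-- def _binIndex(x, bins):
--     # index of the bin x falls into: strict lower edge, inclusive upper, last bin open
--     for j in range(len(bins)-1):
--         if (x > bins[j]) if j == len(bins)-2 else (bins[j] < x <= bins[j+1]):
--             return j
--     return -1
--
-- def findCR2BinIndex(CT, MT):
--     mt = _binIndex(MT, MT_bin)
--     ct = _binIndex(CT, CT_bin)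
--     return -1 if mt == -1 or ct == -1 else mt * (len(CT_bin) - 1) + ct
-- ===== Notes on version B (the rewrite author's own statement) =====
-- stated objective: simpler
-- what changed: Replaces the nested loops with running flat counter and break/else control flow by two independent one-dimensional bin scans (one per axis) combined by the closed-form index mt*(len(CT_bin)-1)+ct.
import Mathlib
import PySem

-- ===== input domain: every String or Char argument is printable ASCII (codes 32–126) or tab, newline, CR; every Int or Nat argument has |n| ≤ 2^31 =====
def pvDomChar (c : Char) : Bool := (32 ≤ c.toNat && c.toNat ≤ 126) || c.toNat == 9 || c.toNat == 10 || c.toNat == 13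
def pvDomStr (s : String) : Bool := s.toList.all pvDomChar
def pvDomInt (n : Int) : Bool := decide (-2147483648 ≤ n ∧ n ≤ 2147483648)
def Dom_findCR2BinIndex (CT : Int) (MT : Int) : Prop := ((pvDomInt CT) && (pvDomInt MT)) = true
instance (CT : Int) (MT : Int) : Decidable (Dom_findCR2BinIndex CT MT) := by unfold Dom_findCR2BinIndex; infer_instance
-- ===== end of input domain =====

-- B replaces A's flat running counter over nested loops with two independent 1D bin scans
-- combined by a closed-form index (objective: simpler).

-- ===== PORT A =====
def pvMT_bin : List Int := [0, 60, 95, 130, -1]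
def pvCT_bin : List Int := [300, 400, -1]

-- inner 'for i in range(len(CT_bin)-1)' loop; returns (idx after the loop, some pickIdx if broken)
def pvAInner (CT : Int) (cut1 : Bool) : List Nat → Int → Int × Option Int
  | [], idx => (idx, none)
  | i :: is, idx =>
    let cut2 : Bool :=
      if i = pvCT_bin.length - 2 then decide (CT > pvCT_bin.getD i 0)
      else decide (CT > pvCT_bin.getD i 0 ∧ CT ≤ pvCT_bin.getD (i+1) 0)
    let idx := idx + 1
    if cut1 && cut2 then (idx, some idx)
    else pvAInner CT cut1 is idx

-- outer 'for j in range(len(MT_bin)-1)' loop with the for/else continue-break pattern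
def pvAOuter (CT MT : Int) : List Nat → Int → Int → Int
  | [], _, pickIdx => pickIdx
  | j :: js, idx, pickIdx =>
    let cut1 : Bool :=
      if j = pvMT_bin.length - 2 then decide (MT > pvMT_bin.getD j 0)
      else decide (MT > pvMT_bin.getD j 0 ∧ MT ≤ pvMT_bin.getD (j+1) 0)
    let r := pvAInner CT cut1 (List.range (pvCT_bin.length - 1)) idx
    -- 'some p' = inner loop broke with pickIdx p (break the outer loop too); 'none' = for/else: continue
    r.2.getD (pvAOuter CT MT js r.1 pickIdx)

def findCR2BinIndex (CT : Int) (MT : Int) : Int :=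
  pvAOuter CT MT (List.range (pvMT_bin.length - 1)) (-1) (-1)

-- ===== PORT B =====
-- B's _binIndex: scan the bins, return the first matching bin index, else -1
def pvBinIndex (x : Int) (bins : List Int) : List Nat → Int
  | [] => -1
  | j :: js =>
    if (if j = bins.length - 2 then decide (x > bins.getD j 0)
        else decide (bins.getD j 0 < x ∧ x ≤ bins.getD (j+1) 0)) = true
    then (j : Int)
    else pvBinIndex x bins js

def findCR2BinIndex_alt (CT : Int) (MT : Int) : Int :=
  let mt := pvBinIndex MT pvMT_bin (List.range (pvMT_bin.length - 1))
  let ct := pvBinIndex CT pvCT_bin (List.range (pvCT_bin.length - 1))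
  if mt = -1 ∨ ct = -1 then -1 else mt * ((pvCT_bin.length : Int) - 1) + ct

-- ===== PRECONDITION & SPEC =====
def Spec_findCR2BinIndex (CT : Int) (MT : Int) (out : Int) : Prop := out = findCR2BinIndex_alt CT MT
instance (CT : Int) (MT : Int) (out : Int) : Decidable (Spec_findCR2BinIndex CT MT out) := by unfold Spec_findCR2BinIndex; infer_instance

-- ===== CLAIM (what is proved, stated in full; the proofs are below) =====
def Claim_equal_findCR2BinIndex : Prop := ∀ (CT : Int) (MT : Int), Dom_findCR2BinIndex CT MT → Spec_findCR2BinIndex CT MT (findCR2BinIndex CT MT)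

-- ===== LEMMAS AND PROOFS =====

-- ===== VERDICT (by name: the statement is the Claim_ definition above) =====
set_option maxHeartbeats 4000000 in
theorem findCR2BinIndex_spec : Claim_equal_findCR2BinIndex := by
  intro CT MT _
  unfold Spec_findCR2BinIndex findCR2BinIndex findCR2BinIndex_alt
  norm_num [pvMT_bin, pvCT_bin, List.range, List.range.loop,
    pvAOuter, pvAInner, pvBinIndex]
  split_ifs <;> first | rfl | omega | simp_all
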